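-- pv_equiv track=rewrite | github.com/NikhileshGarol/lambda_conversions | Revival365-report-summary-025000d8-2b0e-442b-aba2-12aad806dd4b/summary_expanded.py | roll_up_category_tests
-- ===== SOURCE A (Python) =====
-- def roll_up_category_tests(tests_list):
--     """
--     If any test is "Bad", => "Bad"
--     Else if any test is "Concern", => "Concern"
--     Else => "Good"
--     """
--     statuses = [t["classification"] for t in tests_list]
--     if any(s == "Bad" for s in statuses):
--         return "Bad"
--     elif any(s == "Concern" for s in statuses):
--         return "Concern"
--     elif all(s == "Good" for s in statuses):
--         return "Good"
--     else:
--         return "Unknown"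
-- ===== SOURCE B (Python) =====
-- _SEVERITY = {"Bad": 3, "Concern": 2, "Good": 0}
-- _LABELS = ["Good", "Unknown", "Concern", "Bad"]
--
-- def roll_up_category_tests(tests_list):
--     # Map each classification to a numeric severity rank, take the maximum
--     # (0 for an empty list), and translate the worst rank back to a label.
--     worst = 0
--     for t in tests_list:
--         worst = max(worst, _SEVERITY.get(t["classification"], 1))
--     return _LABELS[worst]
-- ===== Notes on version B (the rewrite author's own statement) =====
-- stated objective: alternative
-- what changed: Replaces A's materialized statuses list and three priority scans (any Bad / any Concern / all Good) with a numeric severity encoding: each classification maps to a rank via a table, one pass keeps the maximum rank, and a label table translates the worst rank back.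
import Mathlib
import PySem

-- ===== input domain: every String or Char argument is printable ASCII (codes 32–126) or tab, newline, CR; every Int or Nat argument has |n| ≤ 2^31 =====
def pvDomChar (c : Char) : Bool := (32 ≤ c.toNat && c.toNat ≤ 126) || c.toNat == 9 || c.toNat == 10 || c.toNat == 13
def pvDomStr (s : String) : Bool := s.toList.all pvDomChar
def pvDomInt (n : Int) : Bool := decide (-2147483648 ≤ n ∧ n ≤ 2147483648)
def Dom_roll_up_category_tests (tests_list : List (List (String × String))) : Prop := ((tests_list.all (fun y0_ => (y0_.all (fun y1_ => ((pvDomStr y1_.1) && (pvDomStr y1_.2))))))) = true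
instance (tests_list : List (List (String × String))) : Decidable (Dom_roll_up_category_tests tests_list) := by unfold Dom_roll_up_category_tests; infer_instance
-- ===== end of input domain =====

-- B replaces A's statuses list and three priority scans by a numeric severity encoding:
-- one pass keeps the maximum rank from a table, and a label table maps the worst rank back.
-- ===== PORT A =====
def roll_up_category_tests (tests_list : List (List (String × String))) : String :=
  let statuses := tests_list.map (fun t => (PySem.Dict.mk t).getD "classification" "")
  if statuses.any (fun s => s == "Bad") then "Bad"
  else if statuses.any (fun s => s == "Concern") then "Concern"
  else if statuses.all (fun s => s == "Good") then "Good"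
  else "Unknown"

-- ===== PORT B =====
def pvSeverity : PySem.Dict String Nat := PySem.Dict.mk [("Bad", 3), ("Concern", 2), ("Good", 0)]
def pvLabels : List String := ["Good", "Unknown", "Concern", "Bad"]

def roll_up_category_tests_alt (tests_list : List (List (String × String))) : String :=
  let worst := tests_list.foldl
    (fun (w : Nat) t => max w (pvSeverity.getD ((PySem.Dict.mk t).getD "classification" "") 1)) 0
  -- _LABELS[worst]: worst is always ≤ 3, so plain getD is exact here
  pvLabels.getD worst ""

-- ===== PRECONDITION & SPEC =====
-- Pre_ excludes tests missing the "classification" key, where Python A (and B) raise KeyError.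
def Pre_roll_up_category_tests (tests_list : List (List (String × String))) : Prop :=
  ∀ t ∈ tests_list, "classification" ∈ t.map Prod.fst
instance (tests_list : List (List (String × String))) : Decidable (Pre_roll_up_category_tests tests_list) := by unfold Pre_roll_up_category_tests; infer_instance
def pvWitness_roll_up_category_tests : (List (List (String × String))) :=
  [[("classification", "Good")], [("classification", "Concern")]]
def Spec_roll_up_category_tests (tests_list : List (List (String × String))) (out : String) : Prop := out = roll_up_category_tests_alt tests_list
instance (tests_list : List (List (String × String))) (out : String) : Decidable (Spec_roll_up_category_tests tests_list out) := by unfold Spec_roll_up_category_tests; infer_instance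

-- ===== CLAIM (what is proved, stated in full; the proofs are below) =====
def Claim_equal_roll_up_category_tests : Prop := ∀ (tests_list : List (List (String × String))), Dom_roll_up_category_tests tests_list → Pre_roll_up_category_tests tests_list → Spec_roll_up_category_tests tests_list (roll_up_category_tests tests_list)

-- ===== LEMMAS AND PROOFS =====
-- severity rank of one classification string
def pvRank (s : String) : Nat := pvSeverity.getD s 1

lemma pvRank_eq (s : String) :
    pvRank s = if s == "Bad" then 3 else if s == "Concern" then 2 else if s == "Good" then 0 else 1 := by
  simp only [pvRank, pvSeverity, PySem.Dict.getD, PySem.Dict.get?_mk_cons]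
  by_cases h1 : ("Bad" : String) == s
  · simp_all [BEq.comm]
  · by_cases h2 : ("Concern" : String) == s
    · simp_all [BEq.comm]
    · by_cases h3 : ("Good" : String) == s
      · simp_all [BEq.comm]
      · simp_all [BEq.comm, PySem.Dict.get?]

-- nested-if form of the worst rank over a status list
def pvWorst (l : List String) : Nat :=
  if l.any (fun s => s == "Bad") then 3
  else if l.any (fun s => s == "Concern") then 2
  else if l.all (fun s => s == "Good") then 0
  else 1

lemma pvWorst_cons (s : String) (l : List String) :
    pvWorst (s :: l) = max (pvRank s) (pvWorst l) := by
  simp only [pvWorst, pvRank_eq, List.any_cons, List.all_cons]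
  have h4 : pvWorst l ≤ 3 := by unfold pvWorst; split_ifs <;> omega
  by_cases h1 : s == "Bad" <;> by_cases h2 : s == "Concern" <;> by_cases h3 : s == "Good" <;>
    simp_all [pvWorst] <;> split_ifs <;> omega

lemma fold_max_eq (l : List String) (w : Nat) :
    l.foldl (fun (w : Nat) s => max w (pvRank s)) w = max w (pvWorst l) := by
  induction l generalizing w with
  | nil => simp [pvWorst]
  | cons s rest ih =>
      rw [List.foldl_cons, ih, pvWorst_cons]
      omega

-- ===== VERDICT (by name: the statement is the Claim_ definition above) =====
theorem roll_up_category_tests_spec : Claim_equal_roll_up_category_tests := by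
  intro l _ _
  unfold Spec_roll_up_category_tests roll_up_category_tests roll_up_category_tests_alt
  have hfold : l.foldl
      (fun (w : Nat) t => max w (pvSeverity.getD ((PySem.Dict.mk t).getD "classification" "") 1)) 0
      = pvWorst (l.map (fun t => (PySem.Dict.mk t).getD "classification" "")) := by
    have := fold_max_eq (l.map (fun t => (PySem.Dict.mk t).getD "classification" "")) 0
    simpa [List.foldl_map, pvRank] using this
  rw [hfold]
  simp only [pvWorst]
  split_ifs <;> simp [pvLabels]
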